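-- pv_equiv track=rewrite | github.com/wxsh1213/vaxseer | evaluation/baselines/hi_linear_regression.py | get_aa_subs_from_alignment
-- ===== SOURCE A (Python) =====
-- def get_aa_subs_from_alignment(ref_seq, aln_seq, ref_start):
--     new_ref_aa = []
--     new_aln_aa = []
--     for i, (ref_aa, aln_aa) in enumerate(zip(ref_seq, aln_seq)):
--         if ref_aa != "-":
--             new_ref_aa.append(ref_aa)
--             new_aln_aa.append(aln_aa)
--
--     aa_subs = []
--     for i, (ref_aa, aln_aa) in enumerate(zip(new_ref_aa, new_aln_aa)):
--         if ref_aa != aln_aa and aln_aa != "-":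
--             aa_subs.append((ref_aa, i + ref_start - 1, aln_aa))
--     return aa_subs
-- ===== SOURCE B (Python) =====
-- def get_aa_subs_from_alignment(ref_seq, aln_seq, ref_start):
--     aa_subs = []
--     j = 0
--     for ref_aa, aln_aa in zip(ref_seq, aln_seq):
--         if ref_aa != "-":
--             if ref_aa != aln_aa and aln_aa != "-":
--                 aa_subs.append((ref_aa, j + ref_start - 1, aln_aa))
--             j += 1
--     return aa_subs
-- ===== Notes on version B (the rewrite author's own statement) =====
-- stated objective: simpler
-- what changed: Replaced the build-two-filtered-lists-then-rescan two-phase of A by a single fused pass over zip(ref_seq, aln_seq) that threads a non-gap position counter, emitting substitutions directly.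
import Mathlib
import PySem

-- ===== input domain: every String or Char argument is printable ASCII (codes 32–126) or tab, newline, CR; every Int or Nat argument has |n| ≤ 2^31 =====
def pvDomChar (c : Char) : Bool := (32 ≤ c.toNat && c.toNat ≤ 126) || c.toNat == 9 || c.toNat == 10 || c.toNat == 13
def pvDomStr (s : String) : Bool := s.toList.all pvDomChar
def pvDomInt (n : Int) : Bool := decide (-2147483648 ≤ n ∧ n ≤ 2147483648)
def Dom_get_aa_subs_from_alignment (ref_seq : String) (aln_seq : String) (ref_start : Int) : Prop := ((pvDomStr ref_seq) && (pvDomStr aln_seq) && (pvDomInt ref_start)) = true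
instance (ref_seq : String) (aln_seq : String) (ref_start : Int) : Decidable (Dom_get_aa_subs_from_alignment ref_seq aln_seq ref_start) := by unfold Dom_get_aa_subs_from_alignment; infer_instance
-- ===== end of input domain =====

-- B fuses A's two passes (filter into two lists, then rescan) into one pass with a non-gap counter; same result, simpler.


-- ===== PORT A =====
-- first loop of A: collect non-gap reference chars and the aligned chars into two lists
def pvA_phase1 (pairs : List (Char × Char)) : List Char × List Char :=
  pairs.foldl
    (fun acc p => if p.1 ≠ '-' then (acc.1 ++ [p.1], acc.2 ++ [p.2]) else acc)
    ([], [])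

def get_aa_subs_from_alignment (ref_seq : String) (aln_seq : String) (ref_start : Int) : List (String × Int × String) :=
  (((pvA_phase1 (ref_seq.toList.zip aln_seq.toList)).1.zip
      (pvA_phase1 (ref_seq.toList.zip aln_seq.toList)).2).zipIdx).foldl
    (fun acc q =>
      if q.1.1 ≠ q.1.2 ∧ q.1.2 ≠ '-' then
        acc ++ [(q.1.1.toString, (q.2 : Int) + ref_start - 1, q.1.2.toString)]
      else acc)
    []

-- ===== PORT B =====
-- single pass, j counts non-gap reference positions
def pvB_go (ref_start : Int) : List (Char × Char) → Int → List (String × Int × String)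
  | [], _ => []
  | (r, a) :: rest, j =>
    if r ≠ '-' then
      (if r ≠ a ∧ a ≠ '-' then [(r.toString, j + ref_start - 1, a.toString)] else [])
        ++ pvB_go ref_start rest (j + 1)
    else pvB_go ref_start rest j

def get_aa_subs_from_alignment_alt (ref_seq : String) (aln_seq : String) (ref_start : Int) : List (String × Int × String) :=
  pvB_go ref_start (ref_seq.toList.zip aln_seq.toList) 0

-- ===== PRECONDITION & SPEC =====
def Spec_get_aa_subs_from_alignment (ref_seq : String) (aln_seq : String) (ref_start : Int) (out : List (String × Int × String)) : Prop := out = get_aa_subs_from_alignment_alt ref_seq aln_seq ref_start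
instance (ref_seq : String) (aln_seq : String) (ref_start : Int) (out : List (String × Int × String)) : Decidable (Spec_get_aa_subs_from_alignment ref_seq aln_seq ref_start out) := by unfold Spec_get_aa_subs_from_alignment; infer_instance

-- ===== CLAIM (what is proved, stated in full; the proofs are below) =====
def Claim_equal_get_aa_subs_from_alignment : Prop := ∀ (ref_seq : String) (aln_seq : String) (ref_start : Int), Dom_get_aa_subs_from_alignment ref_seq aln_seq ref_start → Spec_get_aa_subs_from_alignment ref_seq aln_seq ref_start (get_aa_subs_from_alignment ref_seq aln_seq ref_start)

-- ===== LEMMAS AND PROOFS =====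

-- phase 1 of A builds the two projections of the non-gap filter
theorem pvA_phase1_foldl (pairs : List (Char × Char)) (r0 a0 : List Char) :
    pairs.foldl
      (fun acc p => if p.1 ≠ '-' then (acc.1 ++ [p.1], acc.2 ++ [p.2]) else acc)
      (r0, a0)
    = (r0 ++ ((pairs.filter (fun p => p.1 != '-')).map Prod.fst),
       a0 ++ ((pairs.filter (fun p => p.1 != '-')).map Prod.snd)) := by
  induction pairs generalizing r0 a0 with
  | nil => simp
  | cons p t ih =>
    by_cases h : p.1 = '-'
    · rw [List.foldl_cons, if_neg (by simp [h]), List.filter_cons_of_neg (by simp [h]), ih]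
    · rw [List.foldl_cons, if_pos h, List.filter_cons_of_pos (by simp [h]), ih]
      simp

theorem pvA_phase1_eq (pairs : List (Char × Char)) :
    pvA_phase1 pairs
    = ((pairs.filter (fun p => p.1 != '-')).map Prod.fst,
       (pairs.filter (fun p => p.1 != '-')).map Prod.snd) := by
  unfold pvA_phase1
  rw [pvA_phase1_foldl]
  simp

-- A's second loop with an accumulator, written without the accumulator
def pvP (rs : Int) : List ((Char × Char) × Nat) → List (String × Int × String)
  | [] => []
  | q :: t =>
    (if q.1.1 ≠ q.1.2 ∧ q.1.2 ≠ '-' then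
      [(q.1.1.toString, (q.2 : Int) + rs - 1, q.1.2.toString)] else []) ++ pvP rs t

theorem pvP_foldl (rs : Int) (l : List ((Char × Char) × Nat))
    (acc : List (String × Int × String)) :
    l.foldl
      (fun acc q =>
        if q.1.1 ≠ q.1.2 ∧ q.1.2 ≠ '-' then
          acc ++ [(q.1.1.toString, (q.2 : Int) + rs - 1, q.1.2.toString)]
        else acc) acc
    = acc ++ pvP rs l := by
  induction l generalizing acc with
  | nil => simp [pvP]
  | cons q t ih =>
    by_cases h : q.1.1 ≠ q.1.2 ∧ q.1.2 ≠ '-'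
    · rw [List.foldl_cons, if_pos h, ih, pvP, if_pos h, List.append_assoc]
    · rw [List.foldl_cons, if_neg h, ih, pvP, if_neg h, List.nil_append]

-- B's fused loop equals A's second phase applied to the filtered, indexed list
theorem pvB_go_eq (rs : Int) (pairs : List (Char × Char)) (n : ℕ) :
    pvB_go rs pairs (n : Int) = pvP rs ((pairs.filter (fun p => p.1 != '-')).zipIdx n) := by
  induction pairs generalizing n with
  | nil => simp [pvB_go, pvP]
  | cons p t ih =>
    obtain ⟨r, a⟩ := p
    by_cases h : r = '-'
    · rw [pvB_go, if_neg (by simp [h]), List.filter_cons_of_neg (by simp [h]), ih]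
    · have hc : ((n : Int) + 1) = ((n + 1 : ℕ) : Int) := by push_cast; ring
      rw [pvB_go, if_pos h, List.filter_cons_of_pos (by simp [h]), List.zipIdx_cons,
        pvP, hc, ih]

-- ===== VERDICT (by name: the statement is the Claim_ definition above) =====
theorem get_aa_subs_from_alignment_spec : Claim_equal_get_aa_subs_from_alignment := by
  intro ref_seq aln_seq ref_start _
  unfold Spec_get_aa_subs_from_alignment get_aa_subs_from_alignment get_aa_subs_from_alignment_alt
  rw [pvA_phase1_eq, List.zip_map']
  have h2 : (((ref_seq.toList.zip aln_seq.toList).filter (fun p => p.1 != '-')).map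
      (fun p => (p.1, p.2)))
      = ((ref_seq.toList.zip aln_seq.toList).filter (fun p => p.1 != '-')) := by simp
  rw [h2, pvP_foldl, List.nil_append]
  have h3 := pvB_go_eq ref_start (ref_seq.toList.zip aln_seq.toList) 0
  rw [Nat.cast_zero] at h3
  rw [h3]
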